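-- pv_equiv track=rewrite | github.com/duckback45/baekjoon | lina/june8.py | get_stt_start_and_last_index
-- ===== SOURCE A (Python) =====
-- def get_stt_start_and_last_index(stt_list, start, end):
--     result = [0,0]
--     last_sst_index = 0
--     for idx, stt in enumerate(stt_list):
--         if stt:  # 문자열이 비어있지 않은 경우에만 처리
--             last_sst_index = last_sst_index + (len(stt))
--             if start >= last_sst_index:
--                 result[0] = idx
--             elif end >= last_sst_index:
--                 result[1] = idx
--
--
--     return result
-- ===== SOURCE B (Python) =====
-- def _bisect_right(a, x):
--     # standard bisect.bisect_right (hand-written: A imports no modules)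
--     lo, hi = 0, len(a)
--     while lo < hi:
--         mid = (lo + hi) // 2
--         if x < a[mid]:
--             hi = mid
--         else:
--             lo = mid + 1
--     return lo
--
--
-- def get_stt_start_and_last_index(stt_list, start, end):
--     # one pass builds cumulative lengths of the non-empty strings (with their
--     # original indices), then two binary searches pick the answers.
--     cums = []
--     idxs = []
--     total = 0
--     for idx, stt in enumerate(stt_list):
--         if stt:
--             total += len(stt)
--             cums.append(total)
--             idxs.append(idx)
--     k1 = _bisect_right(cums, start)
--     k2 = _bisect_right(cums, end)
--     result = [0, 0]
--     if k1 > 0: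
--         result[0] = idxs[k1 - 1]
--     if k2 > k1:
--         result[1] = idxs[k2 - 1]
--     return result
-- ===== Notes on version B (the rewrite author's own statement) =====
-- stated objective: alternative
-- what changed: A's single scan with a stateful elif is replaced by one pass that builds the prefix-sum list of cumulative lengths of the non-empty strings (with their original indices) followed by two hand-written binary searches (bisect_right) that locate result[0] and result[1].
import Mathlib
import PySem

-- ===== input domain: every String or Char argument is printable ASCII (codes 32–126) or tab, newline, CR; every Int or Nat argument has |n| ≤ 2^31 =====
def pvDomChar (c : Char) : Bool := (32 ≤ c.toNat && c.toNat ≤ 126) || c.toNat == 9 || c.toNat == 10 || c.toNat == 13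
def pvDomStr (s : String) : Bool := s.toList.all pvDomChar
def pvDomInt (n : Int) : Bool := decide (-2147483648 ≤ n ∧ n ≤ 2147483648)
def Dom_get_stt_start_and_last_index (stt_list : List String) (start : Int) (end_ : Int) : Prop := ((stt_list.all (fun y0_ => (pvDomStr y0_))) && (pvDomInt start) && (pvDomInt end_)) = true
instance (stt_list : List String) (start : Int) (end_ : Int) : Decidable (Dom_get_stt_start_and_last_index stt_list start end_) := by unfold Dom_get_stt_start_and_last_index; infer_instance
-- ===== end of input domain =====

-- B replaces A's single scan-with-elif by a prefix-sum pass over the non-empty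
-- strings followed by two binary searches (alternative decomposition; same asymptotic cost).

-- ===== PORT A =====
def get_stt_start_and_last_index (stt_list : List String) (start : Int) (end_ : Int) : List Int :=
  -- state = (result[0], result[1], last_sst_index)
  let s := (PySem.List.enumerate stt_list 0).foldl
    (fun (st : Int × Int × Int) (p : Int × String) =>
      if p.2.toList ≠ [] then
        let last' := st.2.2 + PySem.Str.len p.2
        if start ≥ last' then (p.1, st.2.1, last')
        else if end_ ≥ last' then (st.1, p.1, last')
        else (st.1, st.2.1, last')
      else st)
    (0, 0, 0)
  [s.1, s.2.1]

-- ===== PORT B =====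
def get_stt_start_and_last_index_alt (stt_list : List String) (start : Int) (end_ : Int) : List Int :=
  -- state = (cums, idxs, total); Source B's hand-written _bisect_right is exactly
  -- bisect.bisect_right, ported as the PySem primitive PySem.List.bisectRight
  let acc := (PySem.List.enumerate stt_list 0).foldl
    (fun (st : List Int × List Int × Int) (p : Int × String) =>
      if p.2.toList ≠ [] then
        let total' := st.2.2 + PySem.Str.len p.2
        (st.1 ++ [total'], st.2.1 ++ [p.1], total')
      else st)
    ([], [], 0)
  let k1 := PySem.List.bisectRight acc.1 start
  let k2 := PySem.List.bisectRight acc.1 end_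
  let r0 : Int := if 0 < k1 then acc.2.1.getD (k1 - 1) 0 else 0
  let r1 : Int := if k1 < k2 then acc.2.1.getD (k2 - 1) 0 else 0
  [r0, r1]

-- ===== PRECONDITION & SPEC =====
def Spec_get_stt_start_and_last_index (stt_list : List String) (start : Int) (end_ : Int) (out : List Int) : Prop := out = get_stt_start_and_last_index_alt stt_list start end_
instance (stt_list : List String) (start : Int) (end_ : Int) (out : List Int) : Decidable (Spec_get_stt_start_and_last_index stt_list start end_ out) := by unfold Spec_get_stt_start_and_last_index; infer_instance

-- ===== CLAIM (what is proved, stated in full; the proofs are below) =====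
def Claim_equal_get_stt_start_and_last_index : Prop := ∀ (stt_list : List String) (start : Int) (end_ : Int), Dom_get_stt_start_and_last_index stt_list start end_ → Spec_get_stt_start_and_last_index stt_list start end_ (get_stt_start_and_last_index stt_list start end_)

-- ===== LEMMAS AND PROOFS =====

/-- The (cumulative length, index) pairs of the non-empty strings of `ss`,
when enumeration starts at `n` and the running total starts at `t`. -/
def pvPairs (ss : List String) (n t : Int) : List (Int × Int) :=
  match ss with
  | [] => []
  | s :: ss =>
    if s.toList ≠ [] then (t + PySem.Str.len s, n) :: pvPairs ss (n + 1) (t + PySem.Str.len s)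
    else pvPairs ss (n + 1) t

/-- Final running total. -/
def pvTot (ss : List String) (t : Int) : Int :=
  match ss with
  | [] => t
  | s :: ss => pvTot ss (if s.toList ≠ [] then t + PySem.Str.len s else t)

def pvG0 (start : Int) (r : Int) (p : Int × Int) : Int := if start ≥ p.1 then p.2 else r
def pvG1 (start end_ : Int) (r : Int) (p : Int × Int) : Int :=
  if ¬ start ≥ p.1 ∧ end_ ≥ p.1 then p.2 else r

lemma pvPairs_cons_pos (s : String) (ss : List String) (n t : Int) (hs : s.toList ≠ []) :
    pvPairs (s :: ss) n t = (t + PySem.Str.len s, n) :: pvPairs ss (n + 1) (t + PySem.Str.len s) := by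
  simp [pvPairs, hs]

lemma pvPairs_cons_neg (s : String) (ss : List String) (n t : Int) (hs : s.toList = []) :
    pvPairs (s :: ss) n t = pvPairs ss (n + 1) t := by
  simp [pvPairs, hs]

lemma pvStrLen_pos (s : String) (hs : s.toList ≠ []) : (0:Int) < PySem.Str.len s := by
  simp only [PySem.Str.len]
  exact_mod_cast List.length_pos_iff.mpr hs

lemma pvPairs_lt (ss : List String) : ∀ (n t : Int) (p : Int × Int), p ∈ pvPairs ss n t → t < p.1 := by
  induction ss with
  | nil => intro n t p h; simp [pvPairs] at h
  | cons s ss ih =>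
    intro n t p h
    by_cases hs : s.toList = []
    · rw [pvPairs_cons_neg s ss n t hs] at h; exact ih _ _ _ h
    · have hlen := pvStrLen_pos s hs
      rw [pvPairs_cons_pos s ss n t hs] at h
      rcases List.mem_cons.mp h with h | h
      · subst h; simpa using hlen
      · have := ih (n+1) (t + PySem.Str.len s) p h; omega

lemma pvPairs_sorted (ss : List String) : ∀ (n t : Int),
    (pvPairs ss n t).Pairwise (fun p q => p.1 < q.1) := by
  induction ss with
  | nil => intro n t; simp [pvPairs]
  | cons s ss ih =>
    intro n t
    by_cases hs : s.toList = []
    · rw [pvPairs_cons_neg s ss n t hs]; exact ih _ _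
    · rw [pvPairs_cons_pos s ss n t hs]
      exact List.Pairwise.cons (fun q hq => pvPairs_lt ss _ _ q hq) (ih _ _)

/-- A's fold, characterised by two independent folds over the pairs list. -/
lemma pvFoldA (start end_ : Int) (ss : List String) : ∀ (n t r0 r1 : Int),
    (PySem.List.enumerate ss n).foldl
      (fun (st : Int × Int × Int) (p : Int × String) =>
        if p.2.toList ≠ [] then
          let last' := st.2.2 + PySem.Str.len p.2
          if start ≥ last' then (p.1, st.2.1, last')
          else if end_ ≥ last' then (st.1, p.1, last')
          else (st.1, st.2.1, last')
        else st)
      (r0, r1, t)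
    = ((pvPairs ss n t).foldl (pvG0 start) r0,
       (pvPairs ss n t).foldl (pvG1 start end_) r1, pvTot ss t) := by
  induction ss with
  | nil => intro n t r0 r1; simp [PySem.List.enumerate_nil, pvPairs, pvTot]
  | cons s ss ih =>
    intro n t r0 r1
    rw [PySem.List.enumerate_cons]
    by_cases hs : s.toList = []
    · simp only [List.foldl_cons]
      simp only [ne_eq, hs, not_true_eq_false, if_false]
      rw [pvPairs_cons_neg s ss n t hs, ih]
      simp [pvTot, hs]
    · simp only [List.foldl_cons]
      simp only [ne_eq, hs, not_false_eq_true, if_pos]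
      rw [pvPairs_cons_pos s ss n t hs]
      by_cases h0 : start ≥ t + PySem.Str.len s
      · have ha : t + ((s.length : Int)) ≤ start := by simpa [PySem.Str.len, ge_iff_le] using h0
        have hb : ¬ (start < t + ((s.length : Int))) := not_lt.mpr ha
        simp only [h0, if_pos]
        rw [ih]
        simp [pvTot, hs, pvG0, pvG1, PySem.Str.len, ha]
      · have ha : ¬ (t + ((s.length : Int)) ≤ start) := by
          intro hc; exact h0 (by simpa [PySem.Str.len, ge_iff_le] using hc)
        have hb : start < t + ((s.length : Int)) := not_le.mp ha
        by_cases h1 : end_ ≥ t + PySem.Str.len s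
        · have hc : t + ((s.length : Int)) ≤ end_ := by simpa [PySem.Str.len, ge_iff_le] using h1
          simp only [h0, h1, if_pos, if_false]
          rw [ih]
          simp [pvTot, hs, pvG0, pvG1, PySem.Str.len, ha, hc]
        · have hc : ¬ (t + ((s.length : Int)) ≤ end_) := by
            intro hd; exact h1 (by simpa [PySem.Str.len, ge_iff_le] using hd)
          simp only [h0, h1, if_false]
          rw [ih]
          simp [pvTot, hs, pvG0, pvG1, PySem.Str.len, ha, hc]

/-- B's building fold appends the firsts/seconds of the pairs list. -/
lemma pvFoldB (ss : List String) : ∀ (n t : Int) (cs is0 : List Int),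
    (PySem.List.enumerate ss n).foldl
      (fun (st : List Int × List Int × Int) (p : Int × String) =>
        if p.2.toList ≠ [] then
          let total' := st.2.2 + PySem.Str.len p.2
          (st.1 ++ [total'], st.2.1 ++ [p.1], total')
        else st)
      (cs, is0, t)
    = (cs ++ (pvPairs ss n t).map Prod.fst, is0 ++ (pvPairs ss n t).map Prod.snd, pvTot ss t) := by
  induction ss with
  | nil => intro n t cs is0; simp [PySem.List.enumerate_nil, pvPairs, pvTot]
  | cons s ss ih =>
    intro n t cs is0
    rw [PySem.List.enumerate_cons]
    by_cases hs : s.toList = []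
    · simp only [List.foldl_cons]
      simp only [ne_eq, hs, not_true_eq_false, if_false]
      rw [pvPairs_cons_neg s ss n t hs, ih]
      simp [pvTot, hs]
    · simp only [List.foldl_cons]
      simp only [ne_eq, hs, not_false_eq_true, if_pos]
      rw [pvPairs_cons_pos s ss n t hs, ih]
      simp [pvTot, hs]

/-- countP of a predicate holding exactly on a prefix. -/
lemma pvCountP_prefix (p : Int → Bool) : ∀ (xs : List Int) (k : Nat), k ≤ xs.length →
    (∀ j (hj : j < xs.length), p xs[j] = true ↔ j < k) → xs.countP p = k := by
  intro xs
  induction xs with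
  | nil => intro k hk _; have h0 := Nat.le_zero.mp hk; simp [h0]
  | cons x xs ih =>
    intro k hk hp
    cases k with
    | zero =>
      have h0 : p x = false := by
        have := hp 0 (by simp)
        simpa using this
      have : xs.countP p = 0 := ih 0 (Nat.zero_le _) (by
        intro j hj
        have := hp (j+1) (by simpa using Nat.succ_lt_succ hj)
        simpa using this)
      simp [h0, this]
    | succ m =>
      have h0 : p x = true := (hp 0 (by simp)).mpr (Nat.succ_pos m)
      have : xs.countP p = m := ih m (by simpa using hk) (by
        intro j hj
        have := hp (j+1) (by simpa using Nat.succ_lt_succ hj)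
        simpa [Nat.succ_lt_succ_iff] using this)
      simp [h0, this]

/-- bisect_right on a sorted list counts the elements ≤ x. -/
lemma pvBisect_eq_countP (cs : List Int) (x : Int) (h : cs.Pairwise (· ≤ ·)) :
    PySem.List.bisectRight cs x = cs.countP (fun c => decide (c ≤ x)) := by
  obtain ⟨hle, hlt, hgt⟩ := PySem.List.bisectRight_spec cs x h
  refine (pvCountP_prefix _ cs _ hle ?_).symm
  intro j hj
  constructor
  · intro hpj
    by_contra hge
    have := hgt j hj (Nat.le_of_not_lt hge)
    simp at hpj
    omega
  · intro hjk
    simpa using hlt j hj hjk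

/-- The r0-fold picks the pair at position k₁ - 1 (k₁ = count of cums ≤ start). -/
lemma pvFold0_char (start : Int) : ∀ (ps : List (Int × Int)),
    ps.Pairwise (fun p q => p.1 < q.1) → ∀ (d : Int),
    ps.foldl (pvG0 start) d =
      (if 0 < ps.countP (fun p => decide (p.1 ≤ start))
       then (ps.map Prod.snd).getD (ps.countP (fun p => decide (p.1 ≤ start)) - 1) 0
       else d) := by
  intro ps
  induction ps with
  | nil => intro _ d; simp
  | cons p ps ih =>
    intro hsort d
    have hps := (List.pairwise_cons.mp hsort).2
    have hhd := (List.pairwise_cons.mp hsort).1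
    by_cases hle : p.1 ≤ start
    · simp only [List.foldl_cons, pvG0, ge_iff_le, hle, if_pos]
      rw [ih hps p.2]
      simp only [List.countP_cons, hle, decide_true]
      rcases Nat.eq_zero_or_pos (ps.countP (fun q => decide (q.1 ≤ start))) with h0 | h0
      · simp [h0]
      · simp only [h0, if_pos]
        have : 0 < ps.countP (fun q => decide (q.1 ≤ start)) + 1 := by omega
        simp only [this, if_pos]
        have : ps.countP (fun q => decide (q.1 ≤ start)) + 1 - 1
             = (ps.countP (fun q => decide (q.1 ≤ start)) - 1) + 1 := by omega
        rw [this]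
        simp
    · have hcount : ps.countP (fun q => decide (q.1 ≤ start)) = 0 := by
        rw [List.countP_eq_zero]
        intro q hq
        have := hhd q hq
        simp; omega
      simp only [List.foldl_cons, pvG0, ge_iff_le, hle, if_false]
      rw [ih hps d]
      simp [hle, hcount]

/-- The r1-fold picks the pair at position k₂ - 1 when k₁ < k₂. -/
lemma pvFold1_char (start end_ : Int) : ∀ (ps : List (Int × Int)),
    ps.Pairwise (fun p q => p.1 < q.1) → ∀ (d : Int),
    ps.foldl (pvG1 start end_) d =
      (if ps.countP (fun p => decide (p.1 ≤ start)) < ps.countP (fun p => decide (p.1 ≤ end_))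
       then (ps.map Prod.snd).getD (ps.countP (fun p => decide (p.1 ≤ end_)) - 1) 0
       else d) := by
  intro ps
  induction ps with
  | nil => intro _ d; simp
  | cons p ps ih =>
    intro hsort d
    have hps := (List.pairwise_cons.mp hsort).2
    have hhd := (List.pairwise_cons.mp hsort).1
    have htail : ∀ (x : Int), ¬ p.1 ≤ x → ps.countP (fun q => decide (q.1 ≤ x)) = 0 := by
      intro x hx
      rw [List.countP_eq_zero]
      intro q hq
      have := hhd q hq
      simp; omega
    by_cases hle : p.1 ≤ start
    · -- head does not update r1
      simp only [List.foldl_cons, pvG1, ge_iff_le, hle, not_true_eq_false, false_and, if_false]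
      rw [ih hps d]
      by_cases hee : p.1 ≤ end_
      · simp only [List.countP_cons, hle, hee, decide_true]
        have hiff : ps.countP (fun q => decide (q.1 ≤ start)) < ps.countP (fun q => decide (q.1 ≤ end_)) ↔
            ps.countP (fun q => decide (q.1 ≤ start)) + 1 < ps.countP (fun q => decide (q.1 ≤ end_)) + 1 := by omega
        by_cases hc : ps.countP (fun q => decide (q.1 ≤ start)) < ps.countP (fun q => decide (q.1 ≤ end_))
        · simp only [hc, if_pos, hiff.mp hc]
          have hk2 : 0 < ps.countP (fun q => decide (q.1 ≤ end_)) := by omega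
          have : ps.countP (fun q => decide (q.1 ≤ end_)) + 1 - 1
               = (ps.countP (fun q => decide (q.1 ≤ end_)) - 1) + 1 := by omega
          rw [this]
          simp
        · simp [hc, hiff.not.mp hc]
      · have h2 : ps.countP (fun q => decide (q.1 ≤ end_)) = 0 := htail _ hee
        simp [hle, hee, h2]
    · have h1 : ps.countP (fun q => decide (q.1 ≤ start)) = 0 := htail _ hle
      by_cases hee : p.1 ≤ end_
      · -- head updates r1
        simp only [List.foldl_cons, pvG1, ge_iff_le, hle, not_false_eq_true, hee, and_true, if_pos]
        rw [ih hps p.2]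
        simp only [List.countP_cons, hle, hee, decide_true, decide_false, h1]
        rcases Nat.eq_zero_or_pos (ps.countP (fun q => decide (q.1 ≤ end_))) with h0 | h0
        · simp [h0]
        · have heq : ps.countP (fun q => decide (q.1 ≤ end_)) + 1 - 1
               = (ps.countP (fun q => decide (q.1 ≤ end_)) - 1) + 1 := by omega
          simp [h0, heq]
      · have h2 : ps.countP (fun q => decide (q.1 ≤ end_)) = 0 := htail _ hee
        simp only [List.foldl_cons, pvG1, ge_iff_le, hle, hee, and_false, if_false]
        rw [ih hps d]
        simp [hle, hee, h1, h2]

-- ===== VERDICT (by name: the statement is the Claim_ definition above) =====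
theorem get_stt_start_and_last_index_spec : Claim_equal_get_stt_start_and_last_index := by
  intro stt_list start end_ _
  unfold Spec_get_stt_start_and_last_index
  unfold get_stt_start_and_last_index get_stt_start_and_last_index_alt
  rw [pvFoldA start end_ stt_list 0 0 0 0, pvFoldB stt_list 0 0 [] []]
  simp only [List.nil_append]
  set ps := pvPairs stt_list 0 0 with hps
  have hsort := pvPairs_sorted stt_list 0 0
  rw [← hps] at hsort
  have hsort' : (ps.map Prod.fst).Pairwise (· ≤ ·) :=
    hsort.map Prod.fst (fun a b h => le_of_lt h)
  rw [pvBisect_eq_countP _ start hsort', pvBisect_eq_countP _ end_ hsort']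
  rw [List.countP_map, List.countP_map]
  rw [pvFold0_char start ps hsort 0, pvFold1_char start end_ ps hsort 0]
  rfl
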